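-- pv_equiv track=rewrite | github.com/OLIMEX/WPC | ISSUE-42/SOLUTION-6/noliftpen.py | drawing
-- ===== SOURCE A (Python) =====
-- def is_connected( s1,s2):
--     ''' It checks if s1,s2 segments are connected.
--         NOTE: The argument processesing is ASYMETRIC as the direction matters!
--     '''
--     if (s1[2]==s2[0]  and  s1[3]==s2[1]):    return( s2)
--     if (s1[2]==s2[2]  and  s1[3]==s2[3]):    return( (s2[2],s2[3],s2[0],s2[1]) )
--     return(None)
--
-- def drawing( figure,path):
--     '''The main algorithm: it creates the no-lift-pen path.
--        Input: figure:   segment list;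
--               path:     segment list forming the path to be extended, it must be initialized to
--                         the start segment.
--     '''
--     if not figure: return(True)
--     fig= figure[:]
--     ls= path[-1]    # last segment in the path
--     lsconn= [ s for s in fig if is_connected(ls,s) ]
--     for ns in lsconn:
--
--         fig.remove(ns)
--         path.append( is_connected(ls,ns) )  # is_connected() reverses the segment's end points if needed (direction matters)
--
--         if drawing( fig,path):  return(True)
--         fig.append( ns)
--         path.pop()  # path contains ns or the reversed ns
--
--     return(False)
-- ===== SOURCE B (Python) =====
-- def drawing(figure, path):
--     '''Return-value re-implementation: recurse on the free end-point of the path and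
--        the multiset of remaining segments, scanning candidates with a done/todo zipper
--        instead of copying, mutating and restoring figure and path.
--        NOTE: unlike A, this does not mutate path in place (return value is identical).'''
--     if not figure:
--         return True
--     pt = (path[-1][2], path[-1][3])
--     return chainable(pt, figure)
--
-- def chainable(pt, rem):
--     '''True iff the segments of rem can be ordered (reversing ends as needed) into one
--        connected polyline starting at point pt.'''
--     if not rem:
--         return True
--     done = []
--     todo = rem
--     while todo:
--         s = todo[0]
--         todo = todo[1:]
--         if pt == (s[0], s[1]):
--             if chainable((s[2], s[3]), done + todo):
--                 return True
--         elif pt == (s[2], s[3]):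
--             if chainable((s[0], s[1]), done + todo):
--                 return True
--         done = done + [s]
--     return False
-- ===== Notes on version B (the rewrite author's own statement) =====
-- stated objective: alternative
-- what changed: Replaces A's backtracking that copies figure, pre-filters a candidate list and mutates/restores the shared figure and path (remove/append/pop) by a pure recursion on the path's free end-point and the remaining segments, scanning candidates with a done/todo zipper; A mutates path in place, B does not (return value is identical).
import Mathlib
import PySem

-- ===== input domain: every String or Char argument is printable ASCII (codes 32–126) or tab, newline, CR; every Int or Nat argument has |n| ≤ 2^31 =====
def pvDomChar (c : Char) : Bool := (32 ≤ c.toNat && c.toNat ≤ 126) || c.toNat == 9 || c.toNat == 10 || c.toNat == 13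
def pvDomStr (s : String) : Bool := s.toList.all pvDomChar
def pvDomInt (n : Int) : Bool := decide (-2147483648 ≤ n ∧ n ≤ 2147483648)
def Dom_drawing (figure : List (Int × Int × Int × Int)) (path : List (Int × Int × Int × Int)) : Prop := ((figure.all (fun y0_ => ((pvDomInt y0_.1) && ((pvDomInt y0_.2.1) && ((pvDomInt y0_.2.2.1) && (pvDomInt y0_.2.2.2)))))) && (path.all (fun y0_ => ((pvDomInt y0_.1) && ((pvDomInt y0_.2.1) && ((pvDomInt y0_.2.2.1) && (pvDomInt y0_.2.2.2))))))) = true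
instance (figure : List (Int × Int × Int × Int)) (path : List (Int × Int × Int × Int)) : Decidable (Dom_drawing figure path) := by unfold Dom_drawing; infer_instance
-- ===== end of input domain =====

-- B replaces A's backtracking over a mutated (figure, path) pair by a pure recursion on the
-- path's free END-POINT and the remaining segments (done/todo zipper); return values are
-- proved equal — A additionally mutates `path` in place, B does not (return value only).

-- ===== PORT A =====
-- is_connected(s1, s2): direction-sensitive connection test, returns oriented s2 or None
def isConnected (s1 s2 : Int × Int × Int × Int) : Option (Int × Int × Int × Int) :=
  if s1.2.2.1 = s2.1 ∧ s1.2.2.2 = s2.2.1 then some s2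
  else if s1.2.2.1 = s2.2.2.1 ∧ s1.2.2.2 = s2.2.2.2 then some (s2.2.2.1, s2.2.2.2, s2.1, s2.2.1)
  else none

-- A's recursion, with fuel (recursion depth is at most |figure| + 1, see `drawing`);
-- `loopA` is the body's `for ns in lsconn` loop carrying the mutated fig/path values.
mutual
def drawingAux : Nat → List (Int × Int × Int × Int) → List (Int × Int × Int × Int) → Bool
  | 0, _, _ => false   -- never reached: fuel ≥ |figure| + 1
  | fuel+1, figure, path =>
    if figure = [] then true
    else
      match PySem.List.pyGet? path (-1) with
      | none => false   -- Python raises IndexError here (path empty); excluded by Pre_drawing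
      | some ls =>
        loopA fuel figure path ls (figure.filter (fun s => (isConnected ls s).isSome))
  termination_by fuel _ _ => (fuel, 0)
def loopA : Nat → List (Int × Int × Int × Int) → List (Int × Int × Int × Int) →
    (Int × Int × Int × Int) → List (Int × Int × Int × Int) → Bool
  | _, _, _, _, [] => false
  | fuel, fig, path, ls, ns :: rest =>
    match PySem.List.remove? fig ns, isConnected ls ns with
    | some fig', some c =>
      if drawingAux fuel fig' (path ++ [c]) then true
      else loopA fuel (fig' ++ [ns]) path ls rest
    | _, _ => false   -- never reached: ns ∈ lsconn, so ns ∈ fig and is_connected ls ns ≠ None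
  termination_by fuel _ _ _ cs => (fuel, cs.length + 1)
end

def drawing (figure : List (Int × Int × Int × Int)) (path : List (Int × Int × Int × Int)) : Bool :=
  drawingAux (figure.length + 1) figure path

-- ===== PORT B =====
-- chainable(pt, rem) with its done/todo zipper loop (`pickB` is the `while todo` loop)
mutual
def chainableB : (Int × Int) → List (Int × Int × Int × Int) → Bool
  | _, [] => true
  | pt, s :: todo => pickB pt [] (s :: todo)
  termination_by _ rem => (rem.length, rem.length + 1)
def pickB : (Int × Int) → List (Int × Int × Int × Int) → List (Int × Int × Int × Int) → Bool
  | _, _, [] => false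
  | pt, done, s :: todo =>
    if pt = (s.1, s.2.1) then
      if chainableB (s.2.2.1, s.2.2.2) (done ++ todo) then true
      else pickB pt (done ++ [s]) todo
    else if pt = (s.2.2.1, s.2.2.2) then
      if chainableB (s.1, s.2.1) (done ++ todo) then true
      else pickB pt (done ++ [s]) todo
    else pickB pt (done ++ [s]) todo
  termination_by _ done todo => (done.length + todo.length, todo.length)
  decreasing_by all_goals (simp [Prod.lex_def] <;> omega)
end

def drawing_alt (figure : List (Int × Int × Int × Int)) (path : List (Int × Int × Int × Int)) : Bool :=
  if figure = [] then true
  else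
    match PySem.List.pyGet? path (-1) with
    | none => false   -- Python raises IndexError here (path empty); excluded by Pre_drawing
    | some ls => chainableB (ls.2.2.1, ls.2.2.2) figure

-- ===== PRECONDITION & SPEC =====
-- Pre_ excludes only the inputs where both Pythons raise IndexError: empty path with non-empty figure.
def Pre_drawing (figure : List (Int × Int × Int × Int)) (path : List (Int × Int × Int × Int)) : Prop :=
  figure = [] ∨ path ≠ []
instance (figure : List (Int × Int × Int × Int)) (path : List (Int × Int × Int × Int)) : Decidable (Pre_drawing figure path) := by unfold Pre_drawing; infer_instance
def pvWitness_drawing : (List (Int × Int × Int × Int)) × (List (Int × Int × Int × Int)) :=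
  ([(0, 0, 1, 1)], [(5, 5, 0, 0)])
def Spec_drawing (figure : List (Int × Int × Int × Int)) (path : List (Int × Int × Int × Int)) (out : Bool) : Prop := out = drawing_alt figure path
instance (figure : List (Int × Int × Int × Int)) (path : List (Int × Int × Int × Int)) (out : Bool) : Decidable (Spec_drawing figure path out) := by unfold Spec_drawing; infer_instance

-- ===== CLAIM (what is proved, stated in full; the proofs are below) =====
def Claim_equal_drawing : Prop := ∀ (figure : List (Int × Int × Int × Int)) (path : List (Int × Int × Int × Int)), Dom_drawing figure path → Pre_drawing figure path → Spec_drawing figure path (drawing figure path)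

-- ===== LEMMAS AND PROOFS =====

-- the proof-side vocabulary: a point touches a segment at either end; `step` is the far end
def touches (pt : Int × Int) (s : Int × Int × Int × Int) : Prop :=
  pt = (s.1, s.2.1) ∨ pt = (s.2.2.1, s.2.2.2)
def step (pt : Int × Int) (s : Int × Int × Int × Int) : Int × Int :=
  if pt = (s.1, s.2.1) then (s.2.2.1, s.2.2.2) else (s.1, s.2.1)

-- Ch pt l: the segments of l can be chained into a polyline starting at pt (up to permutation)
inductive Ch : (Int × Int) → List (Int × Int × Int × Int) → Prop where
  | nil (pt : Int × Int) : Ch pt []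
  | cons (pt : Int × Int) (s : Int × Int × Int × Int) (l l' : List (Int × Int × Int × Int)) :
      touches pt s → Ch (step pt s) l → l'.Perm (s :: l) → Ch pt l'

lemma Ch.perm {pt : Int × Int} {l l' : List (Int × Int × Int × Int)}
    (h : Ch pt l) (hp : l.Perm l') : Ch pt l' := by
  cases h with
  | nil => rw [← hp.nil_eq]; exact Ch.nil pt
  | cons pt s m _ ht hc hp' => exact Ch.cons pt s m l' ht hc (hp.symm.trans hp')

lemma isConnected_isSome (ls s : Int × Int × Int × Int) :
    (isConnected ls s).isSome = true ↔ touches (ls.2.2.1, ls.2.2.2) s := by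
  unfold isConnected touches
  split_ifs with h1 h2 <;> simp_all [Prod.ext_iff]

lemma isConnected_end {ls s c : Int × Int × Int × Int} (h : isConnected ls s = some c) :
    (c.2.2.1, c.2.2.2) = step (ls.2.2.1, ls.2.2.2) s := by
  unfold isConnected at h
  unfold step
  split_ifs at h with h1 h2 <;> simp_all [Prod.ext_iff]

-- ===== B side: chainableB pt rem = true ↔ Ch pt rem =====

lemma perm_erase_of_perm_cons {s : Int × Int × Int × Int}
    {l done : List (Int × Int × Int × Int)} (hs : s ∈ done)
    (hperm : done.Perm (s :: l)) : l.Perm (done.erase s) :=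
  (((List.perm_cons_erase hs).symm.trans hperm).cons_inv).symm

lemma pickB_iff (pt : Int × Int) :
    ∀ (todo done : List (Int × Int × Int × Int)),
    (∀ pt' rem', rem'.length < done.length + todo.length →
        (chainableB pt' rem' = true ↔ Ch pt' rem')) →
    0 < done.length + todo.length →
    (∀ s ∈ done, touches pt s → ¬ Ch (step pt s) (done.erase s ++ todo)) →
    (pickB pt done todo = true ↔ Ch pt (done ++ todo)) := by
  intro todo
  induction todo with
  | nil =>
    intro done IH hpos H
    simp only [pickB, List.append_nil]
    constructor
    · intro h; exact absurd h (by simp)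
    · intro hch
      exfalso
      cases hch with
      | nil => simp at hpos
      | cons pt s l l' ht hc hperm =>
        have hs : s ∈ done := hperm.mem_iff.mpr (List.mem_cons_self ..)
        have h2 : l.Perm (done.erase s) := perm_erase_of_perm_cons hs hperm
        exact H s hs ht (hc.perm (by simpa using h2))
  | cons s todo' ih =>
    intro done IH hpos H
    have hIH' : ∀ pt' rem', rem'.length < (done ++ [s]).length + todo'.length →
        (chainableB pt' rem' = true ↔ Ch pt' rem') := by
      intro pt' rem' h; exact IH pt' rem' (by simp at h ⊢; omega)
    have hpos' : 0 < (done ++ [s]).length + todo'.length := by simp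
    -- after a failed (or untried) candidate s, advancing the zipper preserves the iff
    have key : ∀ _ : (touches pt s → ¬ Ch (step pt s) (done ++ todo')),
        (pickB pt (done ++ [s]) todo' = true ↔ Ch pt (done ++ s :: todo')) := by
      intro hnt
      have H' : ∀ t ∈ done ++ [s], touches pt t →
          ¬ Ch (step pt t) ((done ++ [s]).erase t ++ todo') := by
        intro t ht htt
        by_cases hmem : t ∈ done
        · rw [List.erase_append_left _ hmem]
          have := H t hmem htt
          intro hcontr
          exact this (hcontr.perm (by simp [List.append_assoc]))
        · have hts : t = s := by
            rcases List.mem_append.mp ht with h | h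
            · exact absurd h hmem
            · simpa using h
          subst hts
          rw [List.erase_append_right _ hmem]
          simpa using hnt htt
      have hmain := ih (done ++ [s]) hIH' hpos' H'
      rw [hmain]
      constructor
      · intro h; exact h.perm (by simp)
      · intro h; exact h.perm (by simp)
    by_cases h1 : pt = (s.1, s.2.1)
    · have htou : touches pt s := Or.inl h1
      have hstep : step pt s = (s.2.2.1, s.2.2.2) := by simp [step, h1]
      cases hc : chainableB (s.2.2.1, s.2.2.2) (done ++ todo') with
      | true =>
        have hch : Ch (step pt s) (done ++ todo') := by
          rw [hstep]
          exact (IH _ _ (by simp)).mp hc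
        have hgoal : Ch pt (done ++ s :: todo') :=
          Ch.cons pt s (done ++ todo') _ htou hch List.perm_middle
        have heq : pickB pt done (s :: todo') = true := by
          simp [pickB, h1, hc]
        rw [heq]; simpa using hgoal
      | false =>
        have hnch : touches pt s → ¬ Ch (step pt s) (done ++ todo') := by
          intro _ hch
          rw [hstep] at hch
          have := (IH _ _ (by simp)).mpr hch
          rw [hc] at this; exact absurd this (by simp)
        have heq : pickB pt done (s :: todo') = pickB pt (done ++ [s]) todo' := by
          simp [pickB, h1, hc]
        rw [heq]; exact key hnch
    · by_cases h2 : pt = (s.2.2.1, s.2.2.2)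
      · have htou : touches pt s := Or.inr h2
        have hstep : step pt s = (s.1, s.2.1) := by simp [step, h1]
        cases hc : chainableB (s.1, s.2.1) (done ++ todo') with
        | true =>
          have hch : Ch (step pt s) (done ++ todo') := by
            rw [hstep]
            exact (IH _ _ (by simp)).mp hc
          have hgoal : Ch pt (done ++ s :: todo') :=
            Ch.cons pt s (done ++ todo') _ htou hch List.perm_middle
          have heq : pickB pt done (s :: todo') = true := by
            simp only [pickB]
            rw [if_neg h1, if_pos h2, hc]
            all_goals simp
          rw [heq]; simpa using hgoal
        | false =>
          have hnch : touches pt s → ¬ Ch (step pt s) (done ++ todo') := by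
            intro _ hch
            rw [hstep] at hch
            have := (IH _ _ (by simp)).mpr hch
            rw [hc] at this; exact absurd this (by simp)
          have heq : pickB pt done (s :: todo') = pickB pt (done ++ [s]) todo' := by
            simp only [pickB]
            rw [if_neg h1, if_pos h2, hc]
            all_goals simp
          rw [heq]; exact key hnch
      · have hnt : touches pt s → ¬ Ch (step pt s) (done ++ todo') := by
          intro htt
          exact absurd htt (by simp [touches, h1, h2])
        have heq : pickB pt done (s :: todo') = pickB pt (done ++ [s]) todo' := by
          simp [pickB, h1, h2]
        rw [heq]; exact key hnt

lemma chainableB_iff (n : Nat) : ∀ (pt : Int × Int) (rem : List (Int × Int × Int × Int)),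
    rem.length ≤ n → (chainableB pt rem = true ↔ Ch pt rem) := by
  induction n with
  | zero =>
    intro pt rem h
    have hrem : rem = [] := List.length_eq_zero_iff.mp (by omega)
    subst hrem
    simp [chainableB]
    exact Ch.nil pt
  | succ n ihn =>
    intro pt rem h
    cases rem with
    | nil => simp [chainableB]; exact Ch.nil pt
    | cons s todo =>
      have hpick := pickB_iff pt (s :: todo) []
        (fun pt' rem' hlen => ihn pt' rem' (by simp at hlen h ⊢; omega))
        (by simp) (by simp)
      simpa [chainableB] using hpick

-- ===== A side: drawingAux = true ↔ Ch =====

lemma loopA_iff (fuel : Nat)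
    (IHd : ∀ fig' path' ls', fig'.length < fuel → PySem.List.pyGet? path' (-1) = some ls' →
      (drawingAux fuel fig' path' = true ↔ Ch (ls'.2.2.1, ls'.2.2.2) fig'))
    (fig0 : List (Int × Int × Int × Int)) (ls : Int × Int × Int × Int) :
    ∀ (cs figc : List (Int × Int × Int × Int)) (path : List (Int × Int × Int × Int)),
    figc.Perm fig0 → (∀ ns ∈ cs, ns ∈ fig0 ∧ (isConnected ls ns).isSome = true) →
    fig0.length ≤ fuel →
    (loopA fuel figc path ls cs = true ↔
      ∃ ns ∈ cs, Ch (step (ls.2.2.1, ls.2.2.2) ns) (fig0.erase ns)) := by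
  intro cs
  induction cs with
  | nil => intro figc path _ _ _; simp [loopA]
  | cons ns rest ih =>
    intro figc path hperm hcs hlen
    obtain ⟨hns0, hconn⟩ := hcs ns (List.mem_cons_self ..)
    have hnsf : ns ∈ figc := hperm.mem_iff.mpr hns0
    have hrem : PySem.List.remove? figc ns = some (figc.erase ns) :=
      PySem.List.remove?_eq_some_erase figc ns hnsf
    obtain ⟨c, hc⟩ : ∃ c, isConnected ls ns = some c := Option.isSome_iff_exists.mp hconn
    have hlast : PySem.List.pyGet? (path ++ [c]) (-1) = some c :=
      PySem.List.pyGet?_neg_one_append_singleton ..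
    have hlenE : (figc.erase ns).length < fuel := by
      have h1 := List.length_erase_of_mem hnsf
      have h2 := hperm.length_eq
      have h3 : 0 < figc.length := List.length_pos_of_mem hnsf
      omega
    have hinner := IHd (figc.erase ns) (path ++ [c]) c hlenE hlast
    have hstepc : (c.2.2.1, c.2.2.2) = step (ls.2.2.1, ls.2.2.2) ns := isConnected_end hc
    have hperase : (figc.erase ns).Perm (fig0.erase ns) := hperm.erase ns
    rw [hstepc] at hinner
    cases hD : drawingAux fuel (figc.erase ns) (path ++ [c]) with
    | true =>
      have hgoal : Ch (step (ls.2.2.1, ls.2.2.2) ns) (fig0.erase ns) :=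
        (hinner.mp hD).perm hperase
      simp only [loopA, hrem, hc, hD, if_true]
      simp only [true_iff]
      exact ⟨ns, List.mem_cons_self .., hgoal⟩
    | false =>
      have hnot : ¬ Ch (step (ls.2.2.1, ls.2.2.2) ns) (fig0.erase ns) := by
        intro hgoal
        have := hinner.mpr (hgoal.perm hperase.symm)
        rw [hD] at this; exact absurd this (by simp)
      have hperm' : (figc.erase ns ++ [ns]).Perm fig0 :=
        ((List.perm_append_singleton ..).trans (List.perm_cons_erase hnsf).symm).trans hperm
      have hrest := ih (figc.erase ns ++ [ns]) path hperm'
        (fun x hx => hcs x (List.mem_cons_of_mem _ hx)) hlen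
      simp only [loopA, hrem, hc, hD, if_false, Bool.false_eq_true] at *
      rw [hrest]
      constructor
      · rintro ⟨x, hx, hch⟩; exact ⟨x, List.mem_cons_of_mem _ hx, hch⟩
      · rintro ⟨x, hx, hch⟩
        rcases List.mem_cons.mp hx with h | h
        · subst h; exact absurd hch hnot
        · exact ⟨x, h, hch⟩

lemma drawingAux_iff : ∀ (fuel : Nat) (fig path : List (Int × Int × Int × Int))
    (ls : Int × Int × Int × Int), fig.length < fuel →
    PySem.List.pyGet? path (-1) = some ls →
    (drawingAux fuel fig path = true ↔ Ch (ls.2.2.1, ls.2.2.2) fig) := by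
  intro fuel
  induction fuel with
  | zero => intro fig path ls hlen _; omega
  | succ fuel ihf =>
    intro fig path ls hlen hget
    cases fig with
    | nil => simp [drawingAux]; exact Ch.nil _
    | cons f fs =>
      have hloop := loopA_iff fuel (fun fig' path' ls' h1 h2 => ihf fig' path' ls' h1 h2)
        (f :: fs) ls ((f :: fs).filter (fun s => (isConnected ls s).isSome)) (f :: fs) path
        (List.Perm.refl _)
        (fun x hx => by
          have := List.mem_filter.mp hx
          exact ⟨this.1, this.2⟩)
        (by omega)
      rw [show drawingAux (fuel + 1) (f :: fs) path
            = loopA fuel (f :: fs) path ls ((f :: fs).filter (fun s => (isConnected ls s).isSome))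
          from by simp [drawingAux, hget]]
      rw [hloop]
      constructor
      · rintro ⟨ns, hmem, hch⟩
        obtain ⟨hin, hc⟩ := List.mem_filter.mp hmem
        exact Ch.cons _ ns ((f :: fs).erase ns) _ ((isConnected_isSome ls ns).mp hc) hch
          (List.perm_cons_erase hin)
      · intro hch
        cases hch with
        | cons pt' s l l' ht hc hperm =>
          have hs : s ∈ f :: fs := hperm.mem_iff.mpr (List.mem_cons_self ..)
          have hfil : s ∈ (f :: fs).filter (fun t => (isConnected ls t).isSome) :=
            List.mem_filter.mpr ⟨hs, (isConnected_isSome ls s).mpr ht⟩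
          exact ⟨s, hfil, hc.perm (perm_erase_of_perm_cons hs hperm)⟩

-- ===== VERDICT (by name: the statement is the Claim_ definition above) =====
theorem drawing_spec : Claim_equal_drawing := by
  intro figure path _ hpre
  unfold Spec_drawing drawing drawing_alt
  rcases eq_or_ne figure [] with hf | hf
  · subst hf; simp [drawingAux]
  · rcases hpre with h | hp
    · exact absurd h hf
    · have hlast : PySem.List.pyGet? path (-1) = some (path.getLast hp) := by
        rw [PySem.List.pyGet?_neg_one, List.getLast?_eq_getLast_of_ne_nil hp]
      simp only [if_neg hf, hlast]
      have hA := drawingAux_iff (figure.length + 1) figure path (path.getLast hp)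
        (by omega) hlast
      have hB := chainableB_iff figure.length ((path.getLast hp).2.2.1, (path.getLast hp).2.2.2)
        figure (le_refl _)
      rcases hAB : drawingAux (figure.length + 1) figure path with _ | _ <;>
        rcases hBB : chainableB ((path.getLast hp).2.2.1, (path.getLast hp).2.2.2) figure with _ | _ <;>
        simp_all
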